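-- pv_equiv track=rewrite | github.com/anurag9601/compiler_prac_sem3 | regular-expressions/practical_8.py | accept_string
-- ===== SOURCE A (Python) =====
-- def accept_string(input_string):
--     if(len(input_string)<3):
--         return "REJECTED"
--     else:
--         if(input_string[0]=="1"):
--             if(input_string[1]=="0"):
--                 if(input_string[2]=="1"):
--                     for i in range(3,len(input_string)):
--                         if(input_string[i]!="1"):
--                             return "REJECTED"
--                     return "ACCEPTED"
--                 return "REJECTED"
--             return "REJECTED"
--         return "REJECTED"
-- ===== SOURCE B (Python) =====
-- def accept_string(input_string):
--     # DFA for the language 101 1*: states 0 -1-> 1 -0-> 2 -1-> 3 (accepting, loops on 1)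
--     DEAD = -1
--     TRANS = {(0, "1"): 1, (1, "0"): 2, (2, "1"): 3, (3, "1"): 3}
--     state = 0
--     for ch in input_string:
--         state = TRANS.get((state, ch), DEAD)
--     return "ACCEPTED" if state == 3 else "REJECTED"
-- ===== Notes on version B (the rewrite author's own statement) =====
-- stated objective: alternative
-- what changed: Replaces the nested length/index guards and trailing index loop with a DFA simulation: one fold over the characters through a transition table, accepting iff the final state is the accepting state.
import Mathlib
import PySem

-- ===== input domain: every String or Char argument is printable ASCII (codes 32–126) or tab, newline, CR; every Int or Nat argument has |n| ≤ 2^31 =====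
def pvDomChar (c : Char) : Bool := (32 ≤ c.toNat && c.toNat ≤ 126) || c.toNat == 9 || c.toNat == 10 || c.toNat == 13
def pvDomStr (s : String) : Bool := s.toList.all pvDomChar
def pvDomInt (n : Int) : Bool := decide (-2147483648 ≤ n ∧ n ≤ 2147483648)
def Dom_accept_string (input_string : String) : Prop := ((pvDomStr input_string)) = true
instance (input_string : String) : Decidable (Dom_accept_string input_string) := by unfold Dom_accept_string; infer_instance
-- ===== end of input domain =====

-- B replaces A's nested guards + trailing index loop with a DFA simulation
-- (one fold through a transition table); same behaviour, same cost.

-- ===== PORT A =====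
-- A's for-loop over range(3, len(s)) with early return; it reads s[i] for i = 3..len-1,
-- i.e. exactly the characters of s.toList.drop 3 (all indices in range), checked in order.
def pvALoop : List Char → String
  | [] => "ACCEPTED"
  | c :: rest => if c ≠ '1' then "REJECTED" else pvALoop rest

def accept_string (input_string : String) : String :=
  if PySem.Str.len input_string < 3 then "REJECTED"
  else
    if PySem.Str.pyGet? input_string 0 = some '1' then
      if PySem.Str.pyGet? input_string 1 = some '0' then
        if PySem.Str.pyGet? input_string 2 = some '1' then
          pvALoop (input_string.toList.drop 3)
        else "REJECTED"
      else "REJECTED"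
    else "REJECTED"

-- ===== PORT B =====
-- TRANS.get((state, ch), DEAD): first-match lookup in the four-entry literal table
def pvTrans (state : Int) (ch : Char) : Int :=
  if state = 0 ∧ ch = '1' then 1
  else if state = 1 ∧ ch = '0' then 2
  else if state = 2 ∧ ch = '1' then 3
  else if state = 3 ∧ ch = '1' then 3
  else -1

def accept_string_alt (input_string : String) : String :=
  if input_string.toList.foldl pvTrans 0 = 3 then "ACCEPTED" else "REJECTED"

-- ===== PRECONDITION & SPEC =====
def Spec_accept_string (input_string : String) (out : String) : Prop := out = accept_string_alt input_string
instance (input_string : String) (out : String) : Decidable (Spec_accept_string input_string out) := by unfold Spec_accept_string; infer_instance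

-- ===== CLAIM (what is proved, stated in full; the proofs are below) =====
def Claim_equal_accept_string : Prop := ∀ (input_string : String), Dom_accept_string input_string → Spec_accept_string input_string (accept_string input_string)

-- ===== LEMMAS AND PROOFS =====
theorem pvDead (cs : List Char) : cs.foldl pvTrans (-1) = -1 := by
  induction cs with
  | nil => rfl
  | cons c rest ih => simpa [pvTrans] using ih

theorem pvFrom3 (cs : List Char) :
    cs.foldl pvTrans 3 = if cs.all (fun c => c == '1') then 3 else -1 := by
  induction cs with
  | nil => rfl
  | cons c rest ih =>
    by_cases h : c = '1'
    · simp [pvTrans, h, ih]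
    · simp [pvTrans, h, pvDead]

theorem pvALoop_eq (cs : List Char) :
    pvALoop cs = if cs.all (fun c => c == '1') then "ACCEPTED" else "REJECTED" := by
  induction cs with
  | nil => simp [pvALoop]
  | cons c rest ih =>
    by_cases h : c = '1'
    · simp [pvALoop, h, ih]
    · simp [pvALoop, h]

theorem pvKey (cs : List Char) :
    (if (cs.length : Int) < 3 then "REJECTED"
      else
        if cs[0]? = some '1' then
          if cs[1]? = some '0' then
            if cs[2]? = some '1' then
              if (cs.drop 3).all (fun c => c == '1') then "ACCEPTED" else "REJECTED"
            else "REJECTED"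
          else "REJECTED"
        else "REJECTED") =
      (if cs.foldl pvTrans 0 = 3 then "ACCEPTED" else "REJECTED") := by
  match cs with
  | [] => simp
  | [a] =>
    simp only [List.foldl]
    by_cases h : a = '1' <;> simp [pvTrans, h]
  | [a, b] =>
    simp only [List.foldl]
    by_cases ha : a = '1' <;> by_cases hb : b = '0' <;>
      simp [pvTrans, ha, hb]
  | a :: b :: c :: rest =>
    simp only [List.length_cons, List.foldl]
    by_cases ha : a = '1' <;> by_cases hb : b = '0' <;> by_cases hc : c = '1' <;>
      simp [pvTrans, ha, hb, hc, pvDead, pvFrom3] <;> omega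

-- ===== VERDICT (by name: the statement is the Claim_ definition above) =====
theorem accept_string_spec : Claim_equal_accept_string := by
  intro s _
  unfold Spec_accept_string accept_string accept_string_alt
  rw [pvALoop_eq]
  simp only [pysem]
  exact pvKey s.toList
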